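-- pv_equiv track=rewrite | github.com/PhunkyBob/adventofcode | 2025/day_02.py | get_invalid_total_in_range_part_A
-- ===== SOURCE A (Python) =====
-- from typing import Any, Callable, Dict, List, Tuple
--
-- MyRange = Tuple[int, int]
--
-- def get_invalid_total_in_range_part_A(my_range: MyRange) -> int:
--     invalid: int = 0
--     i = my_range[0]
--     while i <= my_range[1]:
--         if len(str(i)) % 2 == 1:
--             # Nombre de chiffres impair, on passe directement au prochain nombre avec un nombre pair de chiffres
--             digits = len(str(i))
--             i = 10**digits
--             continue
--         str_i = str(i)
--         mid = len(str_i) // 2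
--         left = str_i[:mid]
--         right = str_i[mid:]
--         if left == right:
--             invalid += i
--         i += 1
--     return invalid
-- ===== SOURCE B (Python) =====
-- def get_invalid_total_in_range_part_A(my_range):
--     a, b = my_range[0], my_range[1]
--     total = 0
--     h = 1
--     p = 10  # invariant: p == 10 ** len(str(h))
--     while True:
--         n = h * (p + 1)  # the number whose decimal halves are both str(h)
--         if n > b:
--             break
--         if n >= a:
--             total += n
--         h += 1
--         if h == p:
--             p *= 10
--     return total
-- ===== Notes on version B (the rewrite author's own statement) =====
-- stated objective: alternative
-- what changed: Instead of scanning every number in [a,b] and testing string halves, B enumerates the half-values h = 1,2,3,... directly (tracking p = 10**len(str(h)) arithmetically) and sums n = h*(p+1), the unique number whose two decimal halves both spell h, whenever a <= n <= b (O(sqrt b) loop iterations vs O(b-a), though the harness's growing-list inputs do not exercise this).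
-- intended difference: On inputs whose start value is at most -10 and whose end value is at least 11, A's odd-digit-count skip fires on a negative number and jumps to 10**len(str(i)), which is at least 1000, silently skipping all invalid numbers below 1000 (A returns only the sum of invalid numbers from 1000 up to the end, e.g. 0 on (-12, 11)), while B returns the intended sum of all invalid numbers in the range (11 on (-12, 11)); invalid numbers are all positive, so skipping none of them is the intended behaviour. — e.g. on get_invalid_total_in_range_part_A([-12, 11]): A returns 0, B returns 11
-- outside the precondition, e.g. on get_invalid_total_in_range_part_A(()): A raises IndexError, B raises IndexError; on get_invalid_total_in_range_part_A((5,)): A raises IndexError, B raises IndexError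
import Mathlib
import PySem

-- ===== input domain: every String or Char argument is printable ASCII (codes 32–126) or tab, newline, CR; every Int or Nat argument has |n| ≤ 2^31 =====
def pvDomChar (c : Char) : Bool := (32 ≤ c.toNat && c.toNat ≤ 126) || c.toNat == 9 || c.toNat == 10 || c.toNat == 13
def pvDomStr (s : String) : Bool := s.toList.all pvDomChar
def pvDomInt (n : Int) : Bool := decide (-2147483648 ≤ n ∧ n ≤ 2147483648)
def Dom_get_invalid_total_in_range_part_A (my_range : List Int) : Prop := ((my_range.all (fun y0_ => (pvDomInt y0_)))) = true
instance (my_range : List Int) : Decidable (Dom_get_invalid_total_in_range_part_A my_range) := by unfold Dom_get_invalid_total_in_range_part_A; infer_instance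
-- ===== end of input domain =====

-- B replaces A's scan of every number in [a,b] by direct enumeration of the half-values h
-- (with p = 10^len(str(h)) tracked arithmetically), summing h*(p+1) when it lies in range.
-- Objective: alternative (a different algorithm; iterates over halves instead of the range).

-- ===== PORT A =====
-- A's while-loop; `fuel` only makes the identical computation structurally total:
-- fuel ≥ (b+1-i).toNat always suffices since i strictly increases, and when fuel
-- hits 0 the loop condition i ≤ b is already false (proved in pvLoopA below).
def pvLoopA_impl (fuel : Nat) (b i invalid : Int) : Int :=
  match fuel with
  | 0 => invalid
  | fuel + 1 =>
    if i ≤ b then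
      let s := PySem.Int.toStr i
      if PySem.Int.mod (PySem.Str.len s) 2 == 1 then
        -- odd digit count: skip to the next number with an even digit count
        let digits := PySem.Str.len s
        pvLoopA_impl fuel b ((10 : Int) ^ digits.toNat) invalid
      else
        let mid := PySem.Int.floordiv (PySem.Str.len s) 2
        let left := PySem.Str.slice s none (some mid)
        let right := PySem.Str.slice s (some mid) none
        pvLoopA_impl fuel b (i + 1) (if left == right then invalid + i else invalid)
    else invalid

def get_invalid_total_in_range_part_A (my_range : List Int) : Int :=
  match PySem.List.pyGet? my_range 0, PySem.List.pyGet? my_range 1 with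
  | some i0, some b => pvLoopA_impl (b + 1 - i0).toNat b i0 0
  | _, _ => 0  -- IndexError in Python: excluded by Pre_

-- ===== PORT B =====
-- Source B's while-True loop; same fuel device (h strictly increases each pass).
def pvLoopB_impl (fuel : Nat) (a b h p total : Int) : Int :=
  match fuel with
  | 0 => total
  | fuel + 1 =>
    let n := h * (p + 1)
    if n > b then total
    else
      let total' := if n ≥ a then total + n else total
      let h' := h + 1
      let p' := if h' = p then p * 10 else p
      pvLoopB_impl fuel a b h' p' total'

def get_invalid_total_in_range_part_A_alt (my_range : List Int) : Int :=
  match PySem.List.pyGet? my_range 0 with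
  | none => 0  -- IndexError in Python: excluded by Pre_
  | some a =>
    match PySem.List.pyGet? my_range 1 with
    | none => 0  -- IndexError in Python: excluded by Pre_
    | some b => pvLoopB_impl (b + 1 - 1).toNat a b 1 10 0

-- ===== PRECONDITION & SPEC =====
-- Pre_ excludes only the inputs on which Python A raises IndexError (fewer than two elements).
def Pre_get_invalid_total_in_range_part_A (my_range : List Int) : Prop := 2 ≤ my_range.length
instance (my_range : List Int) : Decidable (Pre_get_invalid_total_in_range_part_A my_range) := by
  unfold Pre_get_invalid_total_in_range_part_A; infer_instance
def pvWitness_get_invalid_total_in_range_part_A : List Int := [0, 100]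

-- On inputs whose start value is ≤ -10 and whose end value is ≥ 11, A's odd-digit-count skip fires on a
-- negative number and jumps to 10^len(str(i)) ≥ 1000, silently skipping every invalid number
-- below 1000 (A returns only the invalid sum above that point, e.g. 0 on [-12, 11]); B returns
-- the intended sum of all invalid numbers in [a,b] (11 on [-12, 11]) — invalid numbers are all
-- positive, so none of them should be skipped.
def D_get_invalid_total_in_range_part_A (my_range : List Int) : Prop :=
  PySem.List.pyGetD my_range 0 0 ≤ -10 ∧ 11 ≤ PySem.List.pyGetD my_range 1 0
instance (my_range : List Int) : Decidable (D_get_invalid_total_in_range_part_A my_range) := by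
  unfold D_get_invalid_total_in_range_part_A; infer_instance

def Spec_get_invalid_total_in_range_part_A (my_range : List Int) (out : Int) : Prop :=
  ¬ D_get_invalid_total_in_range_part_A my_range → out = get_invalid_total_in_range_part_A_alt my_range
instance (my_range : List Int) (out : Int) : Decidable (Spec_get_invalid_total_in_range_part_A my_range out) := by
  unfold Spec_get_invalid_total_in_range_part_A; infer_instance

def pvDiffWitness_get_invalid_total_in_range_part_A : List Int := [-12, 11]
def pvDiffWitnessOut_get_invalid_total_in_range_part_A : Int × Int := (0, 11)

-- ===== CLAIM (what is proved, stated in full; the proofs are below) =====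
def Claim_unchanged_get_invalid_total_in_range_part_A : Prop := ∀ (my_range : List Int), Dom_get_invalid_total_in_range_part_A my_range → Pre_get_invalid_total_in_range_part_A my_range → Spec_get_invalid_total_in_range_part_A my_range (get_invalid_total_in_range_part_A my_range)
def Claim_changed_get_invalid_total_in_range_part_A : Prop := Dom_get_invalid_total_in_range_part_A (pvDiffWitness_get_invalid_total_in_range_part_A) ∧ Pre_get_invalid_total_in_range_part_A (pvDiffWitness_get_invalid_total_in_range_part_A) ∧ D_get_invalid_total_in_range_part_A (pvDiffWitness_get_invalid_total_in_range_part_A) ∧ get_invalid_total_in_range_part_A (pvDiffWitness_get_invalid_total_in_range_part_A) = pvDiffWitnessOut_get_invalid_total_in_range_part_A.1 ∧ get_invalid_total_in_range_part_A_alt (pvDiffWitness_get_invalid_total_in_range_part_A) = pvDiffWitnessOut_get_invalid_total_in_range_part_A.2 ∧ pvDiffWitnessOut_get_invalid_total_in_range_part_A.1 ≠ pvDiffWitnessOut_get_invalid_total_in_range_part_A.2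
def Claim_exact_get_invalid_total_in_range_part_A : Prop := ∀ (my_range : List Int), Dom_get_invalid_total_in_range_part_A my_range → Pre_get_invalid_total_in_range_part_A my_range → D_get_invalid_total_in_range_part_A my_range → get_invalid_total_in_range_part_A my_range ≠ get_invalid_total_in_range_part_A_alt my_range

-- ===== LEMMAS AND PROOFS =====

lemma pvTDCore : ∀ (fuel m : Nat) (ds : List Char), 1 ≤ m → m ≤ fuel →
    Nat.toDigitsCore 10 fuel m ds = ((Nat.digits 10 m).map Nat.digitChar).reverse ++ ds := by
  intro fuel
  induction fuel with
  | zero => intro m ds h1 h2; omega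
  | succ fuel IH =>
    intro m ds h1 h2
    rw [Nat.toDigitsCore]
    by_cases hd : m / 10 = 0
    · have hm10 : m < 10 := by omega
      have : Nat.digits 10 m = [m % 10] := by
        rw [Nat.digits_def' (by norm_num : (1:Nat) < 10) (by omega)]
        simp [hd]
      simp [hd, this]
    · have hlt : m / 10 < m := Nat.div_lt_self (by omega) (by norm_num)
      simp only [if_neg hd]
      rw [IH (m / 10) _ (by omega) (by omega)]
      rw [Nat.digits_def' (by norm_num : (1:Nat) < 10) (n := m) (by omega)]
      simp

lemma pvTD (m : Nat) (hm : 1 ≤ m) :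
    Nat.toDigits 10 m = ((Nat.digits 10 m).map Nat.digitChar).reverse := by
  unfold Nat.toDigits
  simpa using pvTDCore (m + 1) m [] hm (by omega)

def pvNd (m : Nat) : Nat := (Nat.digits 10 m).length

lemma pvNd_of_bounds {k m : Nat} (hlo : 10 ^ k ≤ m) (hhi : m < 10 ^ (k + 1)) : pvNd m = k + 1 := by
  have h1 : (Nat.digits 10 m).length ≤ k + 1 := (Nat.digits_length_le_iff (by norm_num) m).mpr hhi
  have h2 : k < (Nat.digits 10 m).length := (Nat.lt_digits_length_iff (by norm_num) m).mpr hlo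
  unfold pvNd; omega

lemma pvNd_pos {m : Nat} (hm : 1 ≤ m) : 1 ≤ pvNd m := by
  have h2 : 0 < (Nat.digits 10 m).length := by
    rw [List.length_pos_iff]
    exact Nat.digits_ne_nil_iff_ne_zero.mpr (by omega)
  unfold pvNd; omega

lemma pvNd_bounds {m : Nat} (hm : 1 ≤ m) : 10 ^ (pvNd m - 1) ≤ m ∧ m < 10 ^ pvNd m := by
  constructor
  · exact (Nat.lt_digits_length_iff (by norm_num) m).mp (by have := pvNd_pos hm; unfold pvNd at *; omega)
  · exact (Nat.digits_length_le_iff (by norm_num) m).mp (le_refl _)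

lemma pvDigitChar_inj {a b : Nat} (ha : a < 10) (hb : b < 10)
    (h : Nat.digitChar a = Nat.digitChar b) : a = b := by
  interval_cases a <;> interval_cases b <;> simp_all [Nat.digitChar]

lemma pvDigitChar_ne_dash {a : Nat} (ha : a < 10) : Nat.digitChar a ≠ '-' := by
  interval_cases a <;> simp [Nat.digitChar]

lemma pvMapDC_inj : ∀ {l1 l2 : List Nat}, (∀ x ∈ l1, x < 10) → (∀ x ∈ l2, x < 10) →
    l1.map Nat.digitChar = l2.map Nat.digitChar → l1 = l2 := by
  intro l1
  induction l1 with
  | nil => intro l2 _ _ h; cases l2 <;> simp_all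
  | cons x xs IH =>
    intro l2 h1 h2 h
    cases l2 with
    | nil => simp_all
    | cons y ys =>
      simp only [List.map_cons, List.cons.injEq] at h
      have hx := pvDigitChar_inj (h1 x (by simp)) (h2 y (by simp)) h.1
      have := IH (fun z hz => h1 z (by simp [hz])) (fun z hz => h2 z (by simp [hz])) h.2
      simp [hx, this]

def pvS (lo b : Int) (w : Int → Int) : Int :=
  if lo ≤ b then w lo + pvS (lo + 1) b w else 0
termination_by (b + 1 - lo).toNat
decreasing_by omega

lemma pvS_stop {lo b : Int} (w : Int → Int) (h : b < lo) : pvS lo b w = 0 := by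
  rw [pvS]; simp [not_le.mpr h]

lemma pvS_step {lo b : Int} (w : Int → Int) (h : lo ≤ b) :
    pvS lo b w = w lo + pvS (lo + 1) b w := by
  rw [pvS]; simp [h]

lemma pvS_shift {b : Int} (w : Int → Int) :
    ∀ (n : Nat) (lo lo' : Int), (lo' - lo).toNat = n → lo ≤ lo' →
      (∀ j, lo ≤ j → j < lo' → w j = 0) → pvS lo b w = pvS lo' b w := by
  intro n
  induction n with
  | zero =>
    intro lo lo' hn hle _
    have h : lo = lo' := by omega
    rw [h]
  | succ k IH =>
    intro lo lo' hn hle hz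
    have hlt : lo < lo' := by omega
    by_cases hb : lo ≤ b
    · rw [pvS_step w hb, hz lo le_rfl hlt, IH (lo + 1) lo' (by omega) (by omega)
        (fun j h1 h2 => hz j (by omega) h2)]
      ring
    · rw [pvS_stop w (by omega), pvS_stop w (by omega)]

lemma pvS_congr {b : Int} (w w' : Int → Int) :
    ∀ (n : Nat) (lo : Int), (b + 1 - lo).toNat = n →
      (∀ j, lo ≤ j → j ≤ b → w j = w' j) → pvS lo b w = pvS lo b w' := by
  intro n
  induction n with
  | zero => intro lo hn _; rw [pvS_stop w (by omega), pvS_stop w' (by omega)]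
  | succ k IH =>
    intro lo hn he
    by_cases hb : lo ≤ b
    · rw [pvS_step w hb, pvS_step w' hb, he lo le_rfl hb,
        IH (lo + 1) (by omega) (fun j h1 h2 => he j (by omega) h2)]
    · rw [pvS_stop w (by omega), pvS_stop w' (by omega)]

lemma pvS_nonneg {b : Int} (w : Int → Int) :
    ∀ (n : Nat) (lo : Int), (b + 1 - lo).toNat = n →
      (∀ j, lo ≤ j → j ≤ b → 0 ≤ w j) → 0 ≤ pvS lo b w := by
  intro n
  induction n with
  | zero => intro lo hn _; rw [pvS_stop w (by omega)]
  | succ k IH =>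
    intro lo hn hp
    by_cases hb : lo ≤ b
    · rw [pvS_step w hb]
      have := hp lo le_rfl hb
      have := IH (lo + 1) (by omega) (fun j h1 h2 => hp j (by omega) h2)
      omega
    · rw [pvS_stop w (by omega)]

lemma pvS_concat {b : Int} (w : Int → Int) :
    ∀ (n : Nat) (lo mid : Int), (mid - lo).toNat = n → lo ≤ mid → mid ≤ b + 1 →
      pvS lo b w = pvS lo (mid - 1) w + pvS mid b w := by
  intro n
  induction n with
  | zero =>
    intro lo mid hn h1 h2
    have h : lo = mid := by omega
    rw [h, pvS_stop (lo := mid) (b := mid - 1) w (by omega)]; ring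
  | succ k IH =>
    intro lo mid hn h1 h2
    have hlt : lo < mid := by omega
    have hb : lo ≤ b := by omega
    rw [pvS_step w hb, pvS_step w (show lo ≤ mid - 1 by omega),
      IH (lo + 1) mid (by omega) (by omega) h2]
    ring


def pvF (h : Nat) : Nat := h * (10 ^ pvNd h + 1)

def pvInv (j : Int) : Bool :=
  ((PySem.Int.toChars j).length % 2 == 0) &&
    ((PySem.Int.toChars j).take ((PySem.Int.toChars j).length / 2) ==
      (PySem.Int.toChars j).drop ((PySem.Int.toChars j).length / 2))

lemma pvDigits_pvF {h : Nat} (hh : 1 ≤ h) :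
    Nat.digits 10 (pvF h) = Nat.digits 10 h ++ Nat.digits 10 h := by
  have hne : Nat.digits 10 h ≠ [] := Nat.digits_ne_nil_iff_ne_zero.mpr (by omega)
  have hof : Nat.ofDigits 10 (Nat.digits 10 h ++ Nat.digits 10 h) = pvF h := by
    rw [Nat.ofDigits_append, Nat.ofDigits_digits]
    unfold pvF pvNd; ring
  calc Nat.digits 10 (pvF h) = Nat.digits 10 (Nat.ofDigits 10 (Nat.digits 10 h ++ Nat.digits 10 h)) := by rw [hof]
    _ = Nat.digits 10 h ++ Nat.digits 10 h := by
        apply Nat.digits_ofDigits 10 (by norm_num)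
        · intro l hl
          rcases List.mem_append.mp hl with h' | h' <;> exact Nat.digits_lt_base (by norm_num) h'
        · intro hne2
          rw [List.getLast_append_of_ne_nil hne2 hne]
          exact Nat.getLast_digit_ne_zero 10 (by omega)

lemma pvNd_pvF {h : Nat} (hh : 1 ≤ h) : pvNd (pvF h) = 2 * pvNd h := by
  unfold pvNd
  rw [pvDigits_pvF hh, List.length_append]
  ring

lemma pvF_bounds {h : Nat} (hh : 1 ≤ h) :
    10 ^ (2 * pvNd h - 1) ≤ pvF h ∧ pvF h < 10 ^ (2 * pvNd h) := by
  obtain ⟨hlo, hhi⟩ := pvNd_bounds hh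
  have hk := pvNd_pos hh
  set k := pvNd h with hkdef
  have e1 : 2 * k - 1 = (k - 1) + k := by omega
  have e2 : 2 * k = k + k := by omega
  constructor
  · calc 10 ^ (2 * k - 1) = 10 ^ (k - 1) * 10 ^ k := by rw [e1, pow_add]
      _ ≤ h * 10 ^ k := Nat.mul_le_mul_right _ hlo
      _ ≤ h * (10 ^ k + 1) := Nat.mul_le_mul_left _ (by omega)
      _ = pvF h := rfl
  · have h1 : h + 1 ≤ 10 ^ k := hhi
    calc pvF h = h * 10 ^ k + h := by unfold pvF; ring
      _ < 10 ^ k * 10 ^ k := by nlinarith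
      _ = 10 ^ (2 * k) := by rw [e2, pow_add]

lemma pvInvN_iff (m : Nat) (hm : 1 ≤ m) :
    pvInv (m : Int) = true ↔
      pvNd m % 2 = 0 ∧ (Nat.digits 10 m).take (pvNd m / 2) = (Nat.digits 10 m).drop (pvNd m / 2) := by
  have hcs : PySem.Int.toChars (m : Int) = ((Nat.digits 10 m).map Nat.digitChar).reverse := by
    have hnn : ¬ ((m : Int) < 0) := by omega
    simp [PySem.Int.toChars, hnn]
    rw [pvTD m hm]
  have hlen : (((Nat.digits 10 m).map Nat.digitChar).reverse).length = pvNd m := by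
    simp [pvNd]
  unfold pvInv
  simp only [hcs, hlen, Bool.and_eq_true, beq_iff_eq]
  constructor
  · rintro ⟨hev, heq⟩
    refine ⟨hev, ?_⟩
    rw [List.take_reverse, List.drop_reverse] at heq
    have hlen2 : ((Nat.digits 10 m).map Nat.digitChar).length = pvNd m := by simp [pvNd]
    have hfact : ((Nat.digits 10 m).map Nat.digitChar).length - pvNd m / 2 = pvNd m / 2 := by
      rw [hlen2]; omega
    rw [hfact] at heq
    have heq2 : ((Nat.digits 10 m).drop (pvNd m / 2)).map Nat.digitChar
        = ((Nat.digits 10 m).take (pvNd m / 2)).map Nat.digitChar := by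
      have := List.reverse_injective heq
      simpa [List.map_drop, List.map_take] using this
    have := pvMapDC_inj (fun x hx => Nat.digits_lt_base (by norm_num) (List.mem_of_mem_drop hx))
      (fun x hx => Nat.digits_lt_base (by norm_num) (List.mem_of_mem_take hx)) heq2
    exact this.symm
  · rintro ⟨hev, heq⟩
    refine ⟨hev, ?_⟩
    rw [List.take_reverse, List.drop_reverse]
    have hlen2 : ((Nat.digits 10 m).map Nat.digitChar).length = pvNd m := by simp [pvNd]
    have hfact : ((Nat.digits 10 m).map Nat.digitChar).length - pvNd m / 2 = pvNd m / 2 := by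
      rw [hlen2]; omega
    rw [hfact]
    congr 1
    simp only [← List.map_drop, ← List.map_take]
    rw [heq]


lemma pvInvN_iff' (m : Nat) : pvInv (m : Int) = true ↔ ∃ h : Nat, 1 ≤ h ∧ m = pvF h := by
  rcases Nat.eq_zero_or_pos m with rfl | hm
  · constructor
    · intro h
      exfalso
      revert h
      decide
    · rintro ⟨h, hh, habs⟩
      exfalso
      have := pvF_bounds hh
      have := pvNd_pos hh
      have : (0:Nat) < 10 ^ (2 * pvNd h - 1) := by positivity
      omega
  · rw [pvInvN_iff m hm]
    constructor
    · rintro ⟨hev, heq⟩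
      have hLne : Nat.digits 10 m ≠ [] := Nat.digits_ne_nil_iff_ne_zero.mpr (by omega)
      have hlenL : (Nat.digits 10 m).length = pvNd m := rfl
      have htlen : ((Nat.digits 10 m).take (pvNd m / 2)).length = pvNd m / 2 := by
        rw [List.length_take, hlenL]
        have := pvNd_pos hm
        omega
      have hLtt : Nat.digits 10 m =
          (Nat.digits 10 m).take (pvNd m / 2) ++ (Nat.digits 10 m).take (pvNd m / 2) := by
        conv_lhs => rw [← List.take_append_drop (pvNd m / 2) (Nat.digits 10 m)]
        rw [← heq]
      have htne : (Nat.digits 10 m).take (pvNd m / 2) ≠ [] := by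
        intro h0
        rw [h0, List.nil_append] at hLtt
        exact hLne hLtt
      have hall : ∀ l ∈ (Nat.digits 10 m).take (pvNd m / 2), l < 10 :=
        fun l hl => Nat.digits_lt_base (by norm_num) (List.mem_of_mem_take hl)
      have hlast : ∀ (hne2 : (Nat.digits 10 m).take (pvNd m / 2) ≠ []),
          ((Nat.digits 10 m).take (pvNd m / 2)).getLast hne2 ≠ 0 := by
        intro hne2
        have e1 : (Nat.digits 10 m).getLast? =
            some ((Nat.digits 10 m).getLast hLne) := List.getLast?_eq_some_getLast hLne
        have e2 : ((Nat.digits 10 m).take (pvNd m / 2)).getLast? =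
            some (((Nat.digits 10 m).take (pvNd m / 2)).getLast hne2) :=
          List.getLast?_eq_some_getLast hne2
        have e3 : (Nat.digits 10 m).getLast? = ((Nat.digits 10 m).take (pvNd m / 2)).getLast? := by
          conv_lhs => rw [hLtt]
          exact List.getLast?_append_of_ne_nil _ hne2
        have hz := Nat.getLast_digit_ne_zero 10 (show m ≠ 0 by omega)
        rw [e1, e2] at e3
        have := Option.some.inj e3
        rw [← this]
        exact hz
      have hdig : Nat.digits 10 (Nat.ofDigits 10 ((Nat.digits 10 m).take (pvNd m / 2))) =
          (Nat.digits 10 m).take (pvNd m / 2) :=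
        Nat.digits_ofDigits 10 (by norm_num) _ hall hlast
      have hofpos : 1 ≤ Nat.ofDigits 10 ((Nat.digits 10 m).take (pvNd m / 2)) := by
        by_contra h0
        have hz : Nat.ofDigits 10 ((Nat.digits 10 m).take (pvNd m / 2)) = 0 := by omega
        rw [hz, Nat.digits_zero] at hdig
        exact htne hdig.symm
      refine ⟨Nat.ofDigits 10 ((Nat.digits 10 m).take (pvNd m / 2)), hofpos, ?_⟩
      have hnd : pvNd (Nat.ofDigits 10 ((Nat.digits 10 m).take (pvNd m / 2))) = pvNd m / 2 := by
        have h' := congrArg List.length hdig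
        rw [htlen] at h'
        exact h'
      unfold pvF
      rw [hnd]
      conv_lhs => rw [← Nat.ofDigits_digits 10 m, hLtt]
      rw [Nat.ofDigits_append, htlen]
      ring
    · rintro ⟨h, hh, rfl⟩
      have hdig := pvDigits_pvF hh
      have hnd := pvNd_pvF hh
      constructor
      · rw [hnd]; omega
      · rw [hdig, hnd]
        have hlen : (Nat.digits 10 h).length = pvNd h := rfl
        have hk : 2 * pvNd h / 2 = pvNd h := by omega
        rw [hk, ← hlen, List.take_append_of_le_length le_rfl,
          List.drop_append_of_le_length le_rfl, List.take_length, List.drop_length,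
          List.nil_append]

lemma pvF_mono_le {h1 h2 : Nat} (hh : 1 ≤ h1) (hle : h1 ≤ h2) : pvF h1 ≤ pvF h2 := by
  obtain ⟨hlo1, hhi1⟩ := pvNd_bounds hh
  obtain ⟨hlo2, hhi2⟩ := pvNd_bounds (le_trans hh hle)
  have hkle : pvNd h1 ≤ pvNd h2 := by
    by_contra hc
    push_neg at hc
    have : 10 ^ pvNd h2 ≤ 10 ^ (pvNd h1 - 1) :=
      Nat.pow_le_pow_right (by norm_num) (by omega)
    omega
  rcases Nat.eq_or_lt_of_le hkle with heq | hlt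
  · unfold pvF
    rw [← heq]
    exact Nat.mul_le_mul_right _ hle
  · have h1hi : pvF h1 < 10 ^ (2 * pvNd h1) := (pvF_bounds hh).2
    have h2lo : 10 ^ (2 * pvNd h2 - 1) ≤ pvF h2 := (pvF_bounds (le_trans hh hle)).1
    have : (10:Nat) ^ (2 * pvNd h1) ≤ 10 ^ (2 * pvNd h2 - 1) :=
      Nat.pow_le_pow_right (by norm_num) (by omega)
    omega

lemma pvF_mono {h1 h2 : Nat} (hh : 1 ≤ h1) (hlt : h1 < h2) : pvF h1 < pvF h2 := by
  have h2b := pvNd_pos (show 1 ≤ h2 by omega)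
  have step : pvF (h1 + 1) ≤ pvF h2 := pvF_mono_le (by omega) (by omega)
  have : pvF h1 < pvF (h1 + 1) := by
    have hkle : pvNd h1 ≤ pvNd (h1 + 1) := by
      obtain ⟨hlo1, hhi1⟩ := pvNd_bounds hh
      obtain ⟨hlo2, hhi2⟩ := pvNd_bounds (show 1 ≤ h1 + 1 by omega)
      by_contra hc
      push_neg at hc
      have : 10 ^ pvNd (h1+1) ≤ 10 ^ (pvNd h1 - 1) :=
        Nat.pow_le_pow_right (by norm_num) (by omega)
      omega
    unfold pvF
    calc h1 * (10 ^ pvNd h1 + 1) < (h1 + 1) * (10 ^ pvNd h1 + 1) := by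
          have hp : (0:Nat) < 10 ^ pvNd h1 + 1 := by positivity
          exact (Nat.mul_lt_mul_right hp).mpr (by omega)
      _ ≤ (h1 + 1) * (10 ^ pvNd (h1+1) + 1) := by
          apply Nat.mul_le_mul_left
          have := Nat.pow_le_pow_right (show 1 ≤ 10 by norm_num) hkle
          omega
  omega

lemma pvF_ge {h : Nat} (hh : 1 ≤ h) : 11 ≤ pvF h := by
  have : pvF 1 ≤ pvF h := pvF_mono_le (by norm_num) hh
  have h11 : pvF 1 = 11 := by decide
  omega

lemma pvInv_neg {j : Int} (hj : j < 0) : pvInv j = false := by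
  have hm : 1 ≤ j.natAbs := by omega
  have hcs : PySem.Int.toChars j = '-' :: ((Nat.digits 10 j.natAbs).map Nat.digitChar).reverse := by
    simp [PySem.Int.toChars, hj]
    exact pvTD _ hm
  by_contra hc
  rw [Bool.not_eq_false] at hc
  unfold pvInv at hc
  simp only [hcs, Bool.and_eq_true, beq_iff_eq] at hc
  obtain ⟨hev, heq⟩ := hc
  set r := ((Nat.digits 10 j.natAbs).map Nat.digitChar).reverse with hr
  have hrne : r ≠ [] := by
    rw [hr]
    simp only [ne_eq, List.reverse_eq_nil_iff, List.map_eq_nil_iff]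
    exact Nat.digits_ne_nil_iff_ne_zero.mpr (by omega)
  have hn2 : 1 ≤ ('-' :: r).length / 2 := by
    have : r.length ≠ 0 := fun h0 => hrne (List.eq_nil_of_length_eq_zero h0)
    simp only [List.length_cons]
    omega
  obtain ⟨c, hc2⟩ := Nat.exists_eq_add_of_le hn2
  have htake : ('-' :: r).take (('-' :: r).length / 2) = '-' :: r.take c := by
    rw [hc2, Nat.add_comm 1 c, List.take_succ_cons]
  have hdrop : ('-' :: r).drop (('-' :: r).length / 2) = r.drop c := by
    rw [hc2, Nat.add_comm 1 c, List.drop_succ_cons]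
  have hmem : '-' ∈ ('-' :: r).take (('-' :: r).length / 2) := by
    rw [htake]; exact List.mem_cons_self
  rw [heq, hdrop] at hmem
  have hmem2 : '-' ∈ r := List.mem_of_mem_drop hmem
  rw [hr] at hmem2
  simp only [List.mem_reverse, List.mem_map] at hmem2
  obtain ⟨d, hd, hdc⟩ := hmem2
  exact pvDigitChar_ne_dash (Nat.digits_lt_base (by norm_num) hd) hdc

lemma pvInv_iff (j : Int) : pvInv j = true ↔ ∃ h : Nat, 1 ≤ h ∧ j = ((pvF h : Nat) : Int) := by
  rcases lt_or_ge j 0 with hneg | hpos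
  · rw [pvInv_neg hneg]
    simp only [Bool.false_eq_true, false_iff, not_exists]
    rintro h ⟨hh, habs⟩
    have : (0:Int) ≤ (pvF h : Int) := by positivity
    omega
  · have hj : j = ((j.toNat : Nat) : Int) := by omega
    rw [hj, pvInvN_iff' j.toNat]
    constructor
    · rintro ⟨h, hh, he⟩; exact ⟨h, hh, by exact_mod_cast congrArg (Nat.cast : Nat → Int) he⟩
    · rintro ⟨h, hh, he⟩
      exact ⟨h, hh, by exact_mod_cast he⟩

lemma pvInv_small {j : Int} (hj : j < 11) : pvInv j = false := by
  by_contra hc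
  rw [Bool.not_eq_false, pvInv_iff] at hc
  obtain ⟨h, hh, rfl⟩ := hc
  have := pvF_ge hh
  omega

lemma pvGap {h : Nat} (hh : 1 ≤ h) {j : Int} (h1 : (pvF h : Int) < j)
    (h2 : j < (pvF (h + 1) : Int)) : pvInv j = false := by
  by_contra hc
  rw [Bool.not_eq_false, pvInv_iff] at hc
  obtain ⟨h', hh', rfl⟩ := hc
  have c1 : pvF h < pvF h' := by exact_mod_cast h1
  have c2 : pvF h' < pvF (h + 1) := by exact_mod_cast h2
  rcases le_or_gt h' h with hle | hgt
  · have := pvF_mono_le hh' hle; omega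
  · have := pvF_mono_le (show 1 ≤ h + 1 by omega) (show h + 1 ≤ h' by omega); omega


lemma pvBoolExt {a b : Bool} (h : a = true ↔ b = true) : a = b := by
  cases a <;> cases b <;> simp_all

lemma pvLen_toStr (i : Int) :
    PySem.Str.len (PySem.Int.toStr i) = ((PySem.Int.toChars i).length : Int) := by
  simp [pysem]

lemma pvMod_test (i : Int) :
    (PySem.Int.mod (PySem.Str.len (PySem.Int.toStr i)) 2 == 1) =
      ((PySem.Int.toChars i).length % 2 == 1) := by
  rw [pvLen_toStr]
  have h2 : PySem.Int.mod (((PySem.Int.toChars i).length : Nat) : Int) 2 =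
      ((((PySem.Int.toChars i).length % 2 : Nat)) : Int) := by
    exact_mod_cast PySem.Int.mod_natCast _ 2
  rw [h2]
  apply pvBoolExt
  constructor
  · intro h; rw [beq_iff_eq] at h; rw [Nat.beq_eq_true_eq]; exact_mod_cast h
  · intro h; rw [Nat.beq_eq_true_eq] at h; rw [beq_iff_eq]; exact_mod_cast h

lemma pvStrEq_test (i : Int) :
    (PySem.Str.slice (PySem.Int.toStr i) none (some (PySem.Int.floordiv (PySem.Str.len (PySem.Int.toStr i)) 2)) ==
      PySem.Str.slice (PySem.Int.toStr i) (some (PySem.Int.floordiv (PySem.Str.len (PySem.Int.toStr i)) 2)) none) =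
      ((PySem.Int.toChars i).take ((PySem.Int.toChars i).length / 2) ==
        (PySem.Int.toChars i).drop ((PySem.Int.toChars i).length / 2)) := by
  have hmid : PySem.Int.floordiv (PySem.Str.len (PySem.Int.toStr i)) 2 =
      ((((PySem.Int.toChars i).length / 2 : Nat)) : Int) := by
    rw [pvLen_toStr]
    exact_mod_cast PySem.Int.floordiv_natCast _ 2
  rw [hmid]
  apply pvBoolExt
  rw [beq_iff_eq, beq_iff_eq, ← String.toList_inj]
  have hL : (PySem.Str.slice (PySem.Int.toStr i) none (some ((((PySem.Int.toChars i).length / 2 : Nat)) : Int))).toList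
      = (PySem.Int.toChars i).take ((PySem.Int.toChars i).length / 2) := by
    rw [PySem.Str.toList_slice, PySem.Chars.slice_eq_listSlice, PySem.Int.toList_toStr,
      PySem.List.slice_to_natCast]
  have hR : (PySem.Str.slice (PySem.Int.toStr i) (some ((((PySem.Int.toChars i).length / 2 : Nat)) : Int)) none).toList
      = (PySem.Int.toChars i).drop ((PySem.Int.toChars i).length / 2) := by
    rw [PySem.Str.toList_slice, PySem.Chars.slice_eq_listSlice, PySem.Int.toList_toStr,
      PySem.List.slice_from_natCast]
  rw [hL, hR]

lemma pvInv_even (i : Int) (heven : (PySem.Int.toChars i).length % 2 = 0) :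
    pvInv i = ((PySem.Int.toChars i).take ((PySem.Int.toChars i).length / 2) ==
      (PySem.Int.toChars i).drop ((PySem.Int.toChars i).length / 2)) := by
  unfold pvInv
  rw [heven]
  simp

lemma pvLenChars_zero : (PySem.Int.toChars 0).length = 1 := by decide

lemma pvLenChars_nonneg {i : Int} (hi : 0 ≤ i) (hm : 1 ≤ i.toNat) :
    (PySem.Int.toChars i).length = pvNd i.toNat := by
  have hnn : ¬ (i < 0) := by omega
  simp only [PySem.Int.toChars, if_neg hnn]
  rw [pvTD _ hm]
  simp [pvNd]

lemma pvLenChars_neg {i : Int} (hi : i < 0) :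
    (PySem.Int.toChars i).length = 1 + pvNd i.natAbs := by
  simp only [PySem.Int.toChars, if_pos hi]
  rw [pvTD _ (by omega)]
  simp [pvNd, Nat.add_comm]

lemma pvLt_pow_len {i : Int} (hi : 0 ≤ i) : i < (10 : Int) ^ (PySem.Int.toChars i).length := by
  rcases Nat.eq_zero_or_pos i.toNat with h0 | hpos
  · have : i = 0 := by omega
    subst this
    rw [pvLenChars_zero]
    norm_num
  · rw [pvLenChars_nonneg hi hpos]
    have h2 := (pvNd_bounds hpos).2
    have : i = ((i.toNat : Nat) : Int) := by omega
    rw [this]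
    exact_mod_cast h2

def pvW1 : Int → Int := fun j => if pvInv j then j else 0
def pvW2 (a : Int) : Int → Int := fun j => if a ≤ j ∧ pvInv j = true then j else 0

lemma pvOddGap {i j : Int} (hi : 0 ≤ i) (hodd : (PySem.Int.toChars i).length % 2 = 1)
    (h1 : i ≤ j) (h2 : j < (10 : Int) ^ (PySem.Int.toChars i).length) : pvInv j = false := by
  by_contra hc
  rw [Bool.not_eq_false, pvInv_iff] at hc
  obtain ⟨h', hh', rfl⟩ := hc
  rcases Nat.eq_zero_or_pos i.toNat with hm0 | hmpos
  · have hi0 : i = 0 := by omega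
    subst hi0
    rw [pvLenChars_zero] at h2
    have := pvF_ge hh'
    have : ((pvF h' : Nat) : Int) ≥ 11 := by exact_mod_cast this
    norm_num at h2
    omega
  · rw [pvLenChars_nonneg hi hmpos] at hodd h2
    obtain ⟨hmlo, hmhi⟩ := pvNd_bounds hmpos
    have hd1 : 1 ≤ pvNd i.toNat := pvNd_pos hmpos
    -- j lies in [10^(d-1), 10^d) so it has exactly d digits
    have hjlo : ((10 : Nat) ^ (pvNd i.toNat - 1) : Nat) ≤ (pvF h' : Nat) := by
      have : (((10 : Nat) ^ (pvNd i.toNat - 1) : Nat) : Int) ≤ ((pvF h' : Nat) : Int) := by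
        calc (((10 : Nat) ^ (pvNd i.toNat - 1) : Nat) : Int) ≤ ((i.toNat : Nat) : Int) := by exact_mod_cast hmlo
          _ = i := by omega
          _ ≤ _ := h1
      exact_mod_cast this
    have hjhi : (pvF h' : Nat) < 10 ^ pvNd i.toNat := by
      have : ((pvF h' : Nat) : Int) < (((10 : Nat) ^ pvNd i.toNat : Nat) : Int) := by
        calc ((pvF h' : Nat) : Int) < (10 : Int) ^ pvNd i.toNat := h2
          _ = (((10 : Nat) ^ pvNd i.toNat : Nat) : Int) := by push_cast; ring
      exact_mod_cast this
    have he : pvNd i.toNat - 1 + 1 = pvNd i.toNat := by omega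
    have hnd : pvNd (pvF h') = pvNd i.toNat := by
      have := pvNd_of_bounds (k := pvNd i.toNat - 1) hjlo (by rw [he]; exact hjhi)
      omega
    have h2k := pvNd_pvF hh'
    omega

lemma pvLoopA : ∀ (fuel : Nat) (b i acc : Int), (b + 1 - i).toNat ≤ fuel → 0 ≤ i →
    pvLoopA_impl fuel b i acc = acc + pvS i b pvW1 := by
  intro fuel
  induction fuel with
  | zero =>
    intro b i acc hf hi
    rw [pvS_stop _ (by omega)]
    simp [pvLoopA_impl]
  | succ fuel IH =>
    intro b i acc hf hi
    by_cases hib : i ≤ b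
    · rw [pvLoopA_impl]
      simp only [if_pos hib]
      rw [pvMod_test i]
      by_cases hodd : (PySem.Int.toChars i).length % 2 = 1
      · have hoddb : ((PySem.Int.toChars i).length % 2 == 1) = true := by
          rw [Nat.beq_eq_true_eq]; exact hodd
        rw [hoddb, if_pos rfl]
        simp only [pvLen_toStr, Int.toNat_natCast]
        have hjump := pvLt_pow_len hi
        rw [IH b _ acc (by omega) (by positivity)]
        congr 1
        rw [pvS_shift pvW1 ((10 ^ (PySem.Int.toChars i).length - i).toNat) i _ rfl (by omega)]
        intro j hj1 hj2
        unfold pvW1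
        rw [pvOddGap hi hodd hj1 hj2]
        simp
      · have hoddb : ((PySem.Int.toChars i).length % 2 == 1) = false := by
          rw [beq_eq_false_iff_ne]; exact hodd
        rw [hoddb, if_neg (by simp : ¬ ((false : Bool) = true))]
        rw [pvStrEq_test i]
        have heven : (PySem.Int.toChars i).length % 2 = 0 := by omega
        rw [← pvInv_even i heven]
        rw [IH b (i + 1) _ (by omega) (by omega)]
        rw [pvS_step pvW1 hib]
        unfold pvW1
        by_cases hinv : pvInv i = true
        · rw [hinv]; simp; ring
        · rw [Bool.not_eq_true] at hinv
          rw [hinv]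
          simp
    · rw [pvLoopA_impl]
      simp only [if_neg hib]
      rw [pvS_stop _ (by omega)]
      ring


lemma pvLe_pvF {h : Nat} : h ≤ pvF h := by
  have h1 : 1 ≤ 10 ^ pvNd h + 1 := Nat.le_add_left 1 _
  calc h = h * 1 := by ring
    _ ≤ h * (10 ^ pvNd h + 1) := Nat.mul_le_mul_left h h1
    _ = pvF h := rfl

lemma pvLoopB : ∀ (fuel : Nat) (a b : Int) (h : Nat) (total : Int),
    (b + 1 - (h : Int)).toNat ≤ fuel → 1 ≤ h →
    pvLoopB_impl fuel a b (h : Int) ((10 : Int) ^ pvNd h) total =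
      total + pvS ((pvF h : Nat) : Int) b (pvW2 a) := by
  intro fuel
  induction fuel with
  | zero =>
    intro a b h total hf hh
    have hfh : (h : Int) ≤ ((pvF h : Nat) : Int) := by exact_mod_cast pvLe_pvF
    rw [pvS_stop _ (by omega)]
    simp [pvLoopB_impl]
  | succ fuel IH =>
    intro a b h total hf hh
    rw [pvLoopB_impl]
    have hn : (h : Int) * ((10 : Int) ^ pvNd h + 1) = ((pvF h : Nat) : Int) := by
      unfold pvF; push_cast; ring
    simp only [hn]
    by_cases hgt : ((pvF h : Nat) : Int) > b
    · rw [if_pos hgt, pvS_stop _ (by omega)]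
      ring
    · rw [if_neg hgt]
      have hfh : (h : Int) ≤ ((pvF h : Nat) : Int) := by exact_mod_cast pvLe_pvF
      have hinv : pvInv ((pvF h : Nat) : Int) = true := pvInv_iff _ |>.mpr ⟨h, hh, rfl⟩
      have hmono : pvF h < pvF (h + 1) := pvF_mono hh (by omega)
      have hmonoI : ((pvF h : Nat) : Int) < ((pvF (h + 1) : Nat) : Int) := by exact_mod_cast hmono
      have hcast1 : (h : Int) + 1 = ((h + 1 : Nat) : Int) := by push_cast; ring
      have hcall : pvLoopB_impl fuel a b ((h : Int) + 1)
          (if (h : Int) + 1 = (10 : Int) ^ pvNd h then (10 : Int) ^ pvNd h * 10 else (10 : Int) ^ pvNd h)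
          (if ((pvF h : Nat) : Int) ≥ a then total + ((pvF h : Nat) : Int) else total) =
          (if ((pvF h : Nat) : Int) ≥ a then total + ((pvF h : Nat) : Int) else total) +
            pvS ((pvF (h + 1) : Nat) : Int) b (pvW2 a) := by
        have hhp : h < 10 ^ pvNd h := (pvNd_bounds hh).2
        by_cases hroll : (h : Int) + 1 = (10 : Int) ^ pvNd h
        · have hrollN : h + 1 = 10 ^ pvNd h := by exact_mod_cast hroll
          have hnd1 : pvNd (h + 1) = pvNd h + 1 := by
            apply pvNd_of_bounds (k := pvNd h) (le_of_eq hrollN.symm)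
            rw [hrollN]
            exact Nat.pow_lt_pow_right (by norm_num) (by omega)
          rw [if_pos hroll, hcast1]
          have hp : (10 : Int) ^ pvNd h * 10 = (10 : Int) ^ pvNd (h + 1) := by
            rw [hnd1, pow_succ]
          rw [hp]
          exact IH a b (h + 1) _ (by omega) (by omega)
        · have hrollN : ¬ (h + 1 = 10 ^ pvNd h) := by
            intro hc; apply hroll; exact_mod_cast hc
          have hnd1 : pvNd (h + 1) = pvNd h := by
            have hlo := (pvNd_bounds hh).1
            have hk := pvNd_pos hh
            have he : pvNd h - 1 + 1 = pvNd h := by omega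
            have h1 : 10 ^ (pvNd h - 1) ≤ h + 1 := le_trans hlo (by omega)
            have h2 : h + 1 < 10 ^ (pvNd h - 1 + 1) := by rw [he]; omega
            have h3 := pvNd_of_bounds h1 h2
            omega
          rw [if_neg hroll, hcast1, ← hnd1]
          exact IH a b (h + 1) _ (by omega) (by omega)
      rw [pvS_step (pvW2 a) (show ((pvF h : Nat) : Int) ≤ b by omega), hcall]
      have hshift : pvS (((pvF h : Nat) : Int) + 1) b (pvW2 a) = pvS ((pvF (h + 1) : Nat) : Int) b (pvW2 a) := by
        apply pvS_shift (pvW2 a) ((((pvF (h + 1) : Nat) : Int) - (((pvF h : Nat) : Int) + 1)).toNat) _ _ rfl (by omega)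
        intro j hj1 hj2
        unfold pvW2
        rw [pvGap hh (by omega) hj2]
        simp
      rw [← hshift]
      have hw : pvW2 a ((pvF h : Nat) : Int) = if ((pvF h : Nat) : Int) ≥ a then ((pvF h : Nat) : Int) else 0 := by
        unfold pvW2
        rw [hinv]
        by_cases ha : a ≤ ((pvF h : Nat) : Int)
        · rw [if_pos ⟨ha, rfl⟩, if_pos (by omega)]
        · rw [if_neg (by tauto), if_neg (by omega)]
      rw [hw]
      by_cases ha : ((pvF h : Nat) : Int) ≥ a
      · rw [if_pos ha, if_pos ha]; ring
      · rw [if_neg ha, if_neg ha]; ring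

lemma pvNegSmall : ∀ (fuel : Nat) (b i acc : Int), (b + 1 - i).toNat ≤ fuel → -9 ≤ i → i < 0 →
    pvLoopA_impl fuel b i acc = acc + pvS 0 b pvW1 := by
  intro fuel
  induction fuel with
  | zero =>
    intro b i acc hf h9 hneg
    rw [pvS_stop _ (by omega)]
    simp [pvLoopA_impl]
  | succ fuel IH =>
    intro b i acc hf h9 hneg
    by_cases hib : i ≤ b
    · rw [pvLoopA_impl]
      simp only [if_pos hib]
      rw [pvMod_test]
      have hnd : pvNd i.natAbs = 1 := pvNd_of_bounds (k := 0) (by omega) (by simp; omega)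
      have hlen : (PySem.Int.toChars i).length = 2 := by
        rw [pvLenChars_neg hneg, hnd]
      rw [hlen, if_neg (by decide : ¬ (((2 % 2 == 1) : Bool) = true))]
      rw [pvStrEq_test i, ← pvInv_even i (by rw [hlen]), pvInv_neg hneg,
        if_neg (by simp : ¬ ((false : Bool) = true))]
      by_cases hi1 : i + 1 < 0
      · exact IH b (i + 1) acc (by omega) (by omega) hi1
      · have h0 : i + 1 = 0 := by omega
        rw [h0]
        exact pvLoopA fuel b 0 acc (by omega) le_rfl
    · rw [pvLoopA_impl]
      simp only [if_neg hib]
      rw [pvS_stop _ (by omega)]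
      ring

lemma pvBle10 (b : Int) (hb : b ≤ 10) : ∀ (fuel : Nat) (i acc : Int),
    pvLoopA_impl fuel b i acc = acc := by
  intro fuel
  induction fuel with
  | zero => intro i acc; rfl
  | succ fuel IH =>
    intro i acc
    by_cases hib : i ≤ b
    · rw [pvLoopA_impl]
      simp only [if_pos hib]
      rw [pvMod_test]
      by_cases hodd : (PySem.Int.toChars i).length % 2 = 1
      · rw [(by rw [Nat.beq_eq_true_eq]; exact hodd : ((PySem.Int.toChars i).length % 2 == 1) = true),
          if_pos rfl]
        exact IH _ _
      · rw [(by rw [beq_eq_false_iff_ne]; exact hodd : ((PySem.Int.toChars i).length % 2 == 1) = false),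
          if_neg (by simp : ¬ ((false : Bool) = true))]
        rw [pvStrEq_test i, ← pvInv_even i (by omega)]
        have hfalse : pvInv i = false := by
          rcases le_or_gt 0 i with hpos | hneg2
          · exact pvInv_small (by omega)
          · exact pvInv_neg (by omega)
        rw [hfalse, if_neg (by simp : ¬ ((false : Bool) = true))]
        exact IH _ _
    · rw [pvLoopA_impl]
      simp only [if_neg hib]
  
lemma pvNegBig (b : Int) (hb : 11 ≤ b) : ∀ (fuel : Nat) (i acc : Int),
    (b + 1 - i).toNat ≤ fuel → i ≤ -10 →
    ∃ d : Nat, 3 ≤ d ∧ pvLoopA_impl fuel b i acc = acc + pvS ((10 : Int) ^ d) b pvW1 := by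
  intro fuel
  induction fuel with
  | zero => intro i acc hf hi; omega
  | succ fuel IH =>
    intro i acc hf hi
    have hib : i ≤ b := by omega
    have hneg : i < 0 := by omega
    have hm : 10 ≤ i.natAbs := by omega
    have hnd2 : 2 ≤ pvNd i.natAbs := by
      have h1 : (1:Nat) < (Nat.digits 10 i.natAbs).length :=
        (Nat.lt_digits_length_iff (by norm_num : (1:Nat) < 10) i.natAbs).mpr
          (show 10 ^ 1 ≤ i.natAbs by simpa using hm)
      unfold pvNd
      omega
    have hlen : (PySem.Int.toChars i).length = 1 + pvNd i.natAbs := pvLenChars_neg hneg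
    rw [pvLoopA_impl]
    simp only [if_pos hib]
    rw [pvMod_test]
    by_cases hodd : (PySem.Int.toChars i).length % 2 = 1
    · rw [(by rw [Nat.beq_eq_true_eq]; exact hodd : ((PySem.Int.toChars i).length % 2 == 1) = true),
        if_pos rfl]
      simp only [pvLen_toStr, Int.toNat_natCast]
      refine ⟨(PySem.Int.toChars i).length, by omega, ?_⟩
      have hpow : (0 : Int) ≤ (10 : Int) ^ (PySem.Int.toChars i).length := by positivity
      exact pvLoopA fuel b _ acc (by omega) (by positivity)
    · rw [(by rw [beq_eq_false_iff_ne]; exact hodd : ((PySem.Int.toChars i).length % 2 == 1) = false),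
        if_neg (by simp : ¬ ((false : Bool) = true))]
      rw [pvStrEq_test i, ← pvInv_even i (by omega), pvInv_neg hneg,
        if_neg (by simp : ¬ ((false : Bool) = true))]
      have hne : i ≠ -10 := by
        intro h10
        apply hodd
        have : pvNd i.natAbs = 2 := by
          rw [h10]
          exact pvNd_of_bounds (k := 1) (by norm_num) (by norm_num)
        rw [hlen, this]
      exact IH (i + 1) acc (by omega) (by omega)


lemma pvNd1 : pvNd 1 = 1 := by decide

lemma pvF1 : pvF 1 = 11 := by decide

lemma pvGet0 (x0 x1 : Int) (rest : List Int) :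
    PySem.List.pyGet? (x0 :: x1 :: rest) 0 = some x0 := by
  simp [pysem]

lemma pvGet1 (x0 x1 : Int) (rest : List Int) :
    PySem.List.pyGet? (x0 :: x1 :: rest) 1 = some x1 := by
  have h1 : (1 : Int) = ((0 : Nat) : Int) + 1 := by norm_num
  rw [h1, PySem.List.pyGet?_cons_succ]
  simp [pysem]

lemma pvGetD0 (x0 x1 : Int) (rest : List Int) :
    PySem.List.pyGetD (x0 :: x1 :: rest) 0 0 = x0 := by
  simp [pysem]

lemma pvGetD1 (x0 x1 : Int) (rest : List Int) :
    PySem.List.pyGetD (x0 :: x1 :: rest) 1 0 = x1 := by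
  have h1 : (1 : Int) = ((1 : Nat) : Int) := by norm_num
  rw [h1, PySem.List.pyGetD_natCast]
  rfl

lemma pvAEq (x0 x1 : Int) (rest : List Int) :
    get_invalid_total_in_range_part_A (x0 :: x1 :: rest) =
      pvLoopA_impl (x1 + 1 - x0).toNat x1 x0 0 := by
  unfold get_invalid_total_in_range_part_A
  rw [pvGet0, pvGet1]

lemma pvBEq (x0 x1 : Int) (rest : List Int) :
    get_invalid_total_in_range_part_A_alt (x0 :: x1 :: rest) = pvS 11 x1 (pvW2 x0) := by
  unfold get_invalid_total_in_range_part_A_alt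
  rw [pvGet0, pvGet1]
  have hcall := pvLoopB ((x1 + 1 - 1).toNat) x0 x1 1 0 (by simp) (le_refl 1)
  rw [pvNd1, pow_one, pvF1] at hcall
  simpa using hcall

lemma pvW1_nonneg (x1 : Int) (lo : Int) (hlo : 0 ≤ lo) : 0 ≤ pvS lo x1 pvW1 := by
  apply pvS_nonneg pvW1 ((x1 + 1 - lo).toNat) lo rfl
  intro j hj1 hj2
  unfold pvW1
  split_ifs
  · omega
  · omega

lemma pvSmallShift (x1 : Int) (lo : Int) (h1 : 0 ≤ lo) (h2 : lo ≤ 11) :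
    pvS lo x1 pvW1 = pvS 11 x1 pvW1 := by
  apply pvS_shift pvW1 ((11 - lo).toNat) lo 11 rfl (by omega)
  intro j hj1 hj2
  unfold pvW1
  rw [pvInv_small hj2]
  simp

lemma pvCongrW (x0 x1 lo : Int) (hlo : x0 ≤ lo) :
    pvS lo x1 (pvW2 x0) = pvS lo x1 pvW1 := by
  apply pvS_congr _ _ ((x1 + 1 - lo).toNat) lo rfl
  intro j hj1 hj2
  unfold pvW1 pvW2
  by_cases hv : pvInv j = true
  · rw [if_pos ⟨by omega, hv⟩, if_pos hv]
  · rw [if_neg (by tauto), if_neg hv]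


-- ===== VERDICT (by name: the statement is the Claim_ definition above) =====
theorem get_invalid_total_in_range_part_A_spec : Claim_unchanged_get_invalid_total_in_range_part_A := by
  intro my_range hdom hpre
  unfold Spec_get_invalid_total_in_range_part_A
  intro hnd
  match my_range with
  | [] => exact absurd hpre (by simp [Pre_get_invalid_total_in_range_part_A])
  | [x] => exact absurd hpre (by simp [Pre_get_invalid_total_in_range_part_A])
  | x0 :: x1 :: rest =>
    have hD' : ¬ (x0 ≤ -10 ∧ 11 ≤ x1) := by
      intro ⟨h1, h2⟩
      exact hnd ⟨by rw [pvGetD0]; exact h1, by rw [pvGetD1]; exact h2⟩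
    rw [pvAEq, pvBEq]
    rcases le_or_gt 0 x0 with hx0 | hx0
    · rw [pvLoopA _ x1 x0 0 le_rfl hx0]
      rcases le_or_gt x0 11 with h11 | h11
      · rw [pvSmallShift x1 x0 hx0 h11, ← pvCongrW x0 x1 11 (by omega)]
        ring
      · rw [show pvS 11 x1 (pvW2 x0) = pvS x0 x1 (pvW2 x0) from
            pvS_shift (pvW2 x0) ((x0 - 11).toNat) 11 x0 rfl (by omega)
              (fun j hj1 hj2 => by unfold pvW2; rw [if_neg (by omega)]),
          pvCongrW x0 x1 x0 le_rfl]
        ring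
    · rcases le_or_gt (-9) x0 with hx9 | hx9
      · rw [pvNegSmall _ x1 x0 0 le_rfl hx9 hx0]
        rw [pvSmallShift x1 0 le_rfl (by omega), ← pvCongrW x0 x1 11 (by omega)]
        ring
      · have hb10 : x1 ≤ 10 := by
          by_contra hc
          exact hD' ⟨by omega, by omega⟩
        rw [pvBle10 x1 hb10 _ x0 0, pvS_stop _ (by omega)]

theorem get_invalid_total_in_range_part_A_changed : Claim_changed_get_invalid_total_in_range_part_A := by
  unfold Claim_changed_get_invalid_total_in_range_part_A; decide

theorem get_invalid_total_in_range_part_A_tight : Claim_exact_get_invalid_total_in_range_part_A := by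
  intro my_range hdom hpre hd
  match my_range with
  | [] => exact absurd hpre (by simp [Pre_get_invalid_total_in_range_part_A])
  | [x] => exact absurd hpre (by simp [Pre_get_invalid_total_in_range_part_A])
  | x0 :: x1 :: rest =>
    unfold D_get_invalid_total_in_range_part_A at hd
    rw [pvGetD0, pvGetD1] at hd
    obtain ⟨hx0, hx1⟩ := hd
    rw [pvAEq, pvBEq]
    obtain ⟨d, hd3, hEq⟩ := pvNegBig x1 hx1 ((x1 + 1 - x0).toNat) x0 0 le_rfl hx0
    rw [hEq, pvCongrW x0 x1 11 (by omega)]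
    have hpow : (1000 : Int) ≤ (10 : Int) ^ d := by
      calc (1000 : Int) = 10 ^ 3 := by norm_num
        _ ≤ 10 ^ d := pow_le_pow_right₀ (by norm_num) hd3
    have hw11 : pvW1 11 = 11 := by decide
    rcases le_or_gt ((10 : Int) ^ d) (x1 + 1) with hcase | hcase
    · have hsplit : pvS 11 x1 pvW1 =
          pvS 11 ((10 : Int) ^ d - 1) pvW1 + pvS ((10 : Int) ^ d) x1 pvW1 :=
        pvS_concat pvW1 (((10 : Int) ^ d - 11).toNat) 11 ((10 : Int) ^ d) rfl (by omega) (by omega)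
      have hstep : pvS 11 ((10 : Int) ^ d - 1) pvW1 =
          pvW1 11 + pvS 12 ((10 : Int) ^ d - 1) pvW1 := pvS_step pvW1 (by omega)
      have htail : 0 ≤ pvS 12 ((10 : Int) ^ d - 1) pvW1 := pvW1_nonneg _ 12 (by omega)
      rw [hsplit, hstep, hw11]
      omega
    · have hstop : pvS ((10 : Int) ^ d) x1 pvW1 = 0 := pvS_stop _ (by omega)
      have hstep : pvS 11 x1 pvW1 = pvW1 11 + pvS 12 x1 pvW1 := pvS_step pvW1 (by omega)
      have htail : 0 ≤ pvS 12 x1 pvW1 := pvW1_nonneg _ 12 (by omega)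
      rw [hstop, hstep, hw11]
      omega
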